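-- pv_equiv track=rewrite | github.com/ousema51/Spotify_clone | backend/utils/youtube_music.py | _cookie_header_to_netscape
-- ===== SOURCE A (Python) =====
-- def _cookie_header_to_netscape(text):
--     if not text:
--         return ""
--
--     lines = ["# Netscape HTTP Cookie File"]
--     seen = set()
--     domains = (".youtube.com", ".google.com")
--
--     ignored_attrs = {
--         "path",
--         "domain",
--         "expires",
--         "max-age",
--         "samesite",
--         "secure",
--         "httponly",
--     }
--
--     for part in text.split(";"):
--         chunk = part.strip()
--         if not chunk or "=" not in chunk:
--             continue
--
--         name, value = chunk.split("=", 1)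
--         name = name.strip()
--         value = value.strip()
--
--         if not name or name.lower() in ignored_attrs:
--             continue
--
--         secure = "TRUE" if name.startswith("__Secure-") or name.startswith("__Host-") else "FALSE"
--
--         for domain in domains:
--             key = (domain, name)
--             if key in seen:
--                 continue
--             seen.add(key)
--             lines.append(
--                 "{}\tTRUE\t/\t{}\t2147483647\t{}\t{}".format(
--                     domain,
--                     secure,
--                     name,
--                     value,
--                 )
--             )
--
--     if len(lines) == 1:
--         return ""
--
--     return "\n".join(lines) + "\n"
-- ===== SOURCE B (Python) =====
-- def _cookie_header_to_netscape(text):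
--     if not text:
--         return ""
--
--     ignored_attrs = {
--         "path",
--         "domain",
--         "expires",
--         "max-age",
--         "samesite",
--         "secure",
--         "httponly",
--     }
--
--     # Pass 1: collect cookies into an ordered dict; first occurrence of a name wins.
--     cookies = {}
--     for part in text.split(";"):
--         chunk = part.strip()
--         if not chunk or "=" not in chunk:
--             continue
--         name, value = chunk.split("=", 1)
--         name = name.strip()
--         if not name or name.lower() in ignored_attrs:
--             continue
--         cookies.setdefault(name, value.strip())
--
--     if not cookies:
--         return ""
--
--     # Pass 2: emit two lines (one per domain) for each cookie, in first-seen order.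
--     lines = ["# Netscape HTTP Cookie File"]
--     for name, value in cookies.items():
--         secure = "TRUE" if name.startswith("__Secure-") or name.startswith("__Host-") else "FALSE"
--         lines += [
--             "{}\tTRUE\t/\t{}\t2147483647\t{}\t{}".format(domain, secure, name, value)
--             for domain in (".youtube.com", ".google.com")
--         ]
--
--     return "\n".join(lines) + "\n"
-- ===== Notes on version B (the rewrite author's own statement) =====
-- stated objective: alternative
-- what changed: B replaces A's single pass with a (domain,name) seen-set and inline emission by two passes: an ordered dict built with setdefault (first occurrence wins), then a second loop emitting both domain lines per unique cookie name.
import Mathlib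
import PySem

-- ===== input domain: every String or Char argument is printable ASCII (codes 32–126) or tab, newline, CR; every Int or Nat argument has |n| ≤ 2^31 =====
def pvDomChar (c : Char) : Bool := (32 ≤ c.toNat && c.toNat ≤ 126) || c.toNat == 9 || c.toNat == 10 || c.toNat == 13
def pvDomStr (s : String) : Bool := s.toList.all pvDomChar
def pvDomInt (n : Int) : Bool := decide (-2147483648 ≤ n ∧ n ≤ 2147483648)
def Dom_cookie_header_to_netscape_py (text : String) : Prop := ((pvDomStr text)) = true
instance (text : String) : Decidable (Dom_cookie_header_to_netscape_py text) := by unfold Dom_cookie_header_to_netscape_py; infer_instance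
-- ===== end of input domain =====

-- B is an alternative two-pass decomposition (ordered dict via setdefault, then emission), equal to A on every input.

-- Shared between both ports: the ignored-attribute set, the per-chunk parsing both Pythons
-- perform verbatim (strip, '='-split, name strip/lower checks; none = 'continue'), and the
-- formatted cookie line.
def pvIgnored : List String :=
  ["path", "domain", "expires", "max-age", "samesite", "secure", "httponly"]

def pvSplitSemi (s : String) : List String :=
  (PySem.Str.split? s ";").getD []   -- s.split(";"): sep is the nonempty literal ";", so split? is always `some`

def pvParse (part : String) : Option (String × String) :=
  let chunk := PySem.Str.strip part
  if chunk = "" then none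
  else if ¬ (PySem.Str.isIn "=" chunk = true) then none
  else
    match PySem.Str.splitMax? chunk "=" 1 with
    | some (n :: v :: _) =>
      let name := PySem.Str.strip n
      let value := PySem.Str.strip v
      if name = "" then none
      else if PySem.Str.lower name ∈ pvIgnored then none
      else some (name, value)
    | _ => none

def pvLine (domain secure name value : String) : String :=
  PySem.Str.join "" [domain, "\tTRUE\t/\t", secure, "\t2147483647\t", name, "\t", value]

-- ===== PORT A =====
-- A: one pass; a set of (domain, name) keys already emitted, lines appended inline.
def pvStepA (st : List String × PySem.Set (String × String)) (part : String) :
    List String × PySem.Set (String × String) :=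
  match pvParse part with
  | none => st
  | some (name, value) =>
    let secure := if PySem.Str.startswith name "__Secure-" || PySem.Str.startswith name "__Host-"
      then "TRUE" else "FALSE"
    [".youtube.com", ".google.com"].foldl
      (fun (st : List String × PySem.Set (String × String)) domain =>
        if PySem.Set.contains st.2 (domain, name) then st
        else (st.1 ++ [pvLine domain secure name value], PySem.Set.add st.2 (domain, name)))
      st

def cookie_header_to_netscape_py (text : String) : String :=
  if text = "" then ""
  else
    let st := (pvSplitSemi text).foldl pvStepA
      (["# Netscape HTTP Cookie File"], PySem.Set.empty)
    if st.1.length = 1 then ""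
    else PySem.Str.join "" [PySem.Str.join "\n" st.1, "\n"]

-- ===== PORT B =====
-- B: pass 1 builds an ordered dict name -> first value with setdefault; pass 2 emits lines.
def pvStepB (d : PySem.Dict String String) (part : String) : PySem.Dict String String :=
  match pvParse part with
  | none => d
  | some (name, value) => d.setdefault name value

def pvEmit (p : String × String) : List String :=
  let secure := if PySem.Str.startswith p.1 "__Secure-" || PySem.Str.startswith p.1 "__Host-"
    then "TRUE" else "FALSE"
  [".youtube.com", ".google.com"].map (fun domain => pvLine domain secure p.1 p.2)

def cookie_header_to_netscape_py_alt (text : String) : String :=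
  if text = "" then ""
  else
    let cookies := (pvSplitSemi text).foldl pvStepB (PySem.Dict.empty : PySem.Dict String String)
    if cookies.items = [] then ""
    else
      let lines := cookies.items.foldl (fun lines p => lines ++ pvEmit p)
        ["# Netscape HTTP Cookie File"]
      PySem.Str.join "" [PySem.Str.join "\n" lines, "\n"]

-- ===== PRECONDITION & SPEC =====
def Spec_cookie_header_to_netscape_py (text : String) (out : String) : Prop := out = cookie_header_to_netscape_py_alt text
instance (text : String) (out : String) : Decidable (Spec_cookie_header_to_netscape_py text out) := by unfold Spec_cookie_header_to_netscape_py; infer_instance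

-- ===== CLAIM (what is proved, stated in full; the proofs are below) =====
def Claim_equal_cookie_header_to_netscape_py : Prop := ∀ (text : String), Dom_cookie_header_to_netscape_py text → Spec_cookie_header_to_netscape_py text (cookie_header_to_netscape_py text)

-- ===== LEMMAS AND PROOFS =====

-- The loop invariant: A's (lines, seen) state is determined by B's dict.
def pvInv (st : List String × PySem.Set (String × String)) (d : PySem.Dict String String) : Prop :=
  st.1 = "# Netscape HTTP Cookie File" :: d.items.flatMap pvEmit ∧
  st.2 = d.items.flatMap (fun p => [((".youtube.com" : String), p.1), ((".google.com" : String), p.1)])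

theorem pvInv_step (st : List String × PySem.Set (String × String))
    (d : PySem.Dict String String) (part : String) (h : pvInv st d) :
    pvInv (pvStepA st part) (pvStepB d part) := by
  obtain ⟨h1, h2⟩ := h
  unfold pvStepA pvStepB
  cases hp : pvParse part with
  | none => exact ⟨h1, h2⟩
  | some nv =>
    obtain ⟨name, value⟩ := nv
    dsimp only
    by_cases hc : d.contains name = true
    · -- name already collected: A's seen-set hits for both domains, B's setdefault is a no-op
      rw [PySem.Dict.setdefault_of_contains d value hc]
      have hk : name ∈ d.keys := (PySem.Dict.contains_iff_mem_keys d name).mp hc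
      obtain ⟨p, hpm, hpn⟩ := List.mem_map.mp hk
      have hmem : ∀ dom0 : String, dom0 = ".youtube.com" ∨ dom0 = ".google.com" →
          (dom0, name) ∈ st.2 := by
        intro dom0 hdom
        rw [h2]
        refine List.mem_flatMap.mpr ⟨p, hpm, ?_⟩
        rcases hdom with h' | h' <;> simp [h', hpn]
      have hyt : PySem.Set.contains st.2 (".youtube.com", name) = true := by
        simpa [PySem.Set.contains] using hmem ".youtube.com" (Or.inl rfl)
      have hgg : PySem.Set.contains st.2 (".google.com", name) = true := by
        simpa [PySem.Set.contains] using hmem ".google.com" (Or.inr rfl)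
      simp only [List.foldl_cons, List.foldl_nil]
      rw [if_pos hyt, if_pos hgg]
      exact ⟨h1, h2⟩
    · -- new name: A appends both lines and both keys, B's setdefault inserts at the end
      have hc' : d.contains name = false := by simpa using hc
      rw [PySem.Dict.setdefault_of_not_contains d value hc']
      have hnk : name ∉ d.keys := fun hk => hc ((PySem.Dict.contains_iff_mem_keys d name).mpr hk)
      have hnotin : ∀ dom0 : String, (dom0, name) ∉ st.2 := by
        intro dom0 hin
        rw [h2] at hin
        obtain ⟨p, hpm, hpe⟩ := List.mem_flatMap.mp hin
        simp only [List.mem_cons, List.not_mem_nil, or_false, Prod.mk.injEq] at hpe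
        apply hnk
        rcases hpe with ⟨_, h'⟩ | ⟨_, h'⟩ <;> exact h' ▸ List.mem_map_of_mem hpm
      have hyt : PySem.Set.contains st.2 (".youtube.com", name) = false := by
        simp [PySem.Set.contains]
        exact hnotin _
      have hadd1 : PySem.Set.add st.2 (".youtube.com", name) = st.2 ++ [(".youtube.com", name)] := by
        simp only [PySem.Set.add, hyt, Bool.false_eq_true, if_false]
      have hgg : PySem.Set.contains (st.2 ++ [(".youtube.com", name)])
          (".google.com", name) = false := by
        simp [PySem.Set.contains]
        exact hnotin _
      simp only [List.foldl_cons, List.foldl_nil]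
      rw [if_neg (show ¬ PySem.Set.contains st.2 (".youtube.com", name) = true by
        simp; exact hnotin _)]
      dsimp only
      rw [hadd1, if_neg (show ¬ PySem.Set.contains (st.2 ++ [(".youtube.com", name)])
        (".google.com", name) = true by
        simp; exact hnotin _)]
      refine ⟨?_, ?_⟩
      all_goals rw [PySem.Dict.items_insert_of_not_contains d value hc']
      · simp [h1, pvEmit]
      · simp only [PySem.Set.add, hgg, Bool.false_eq_true, if_false]
        simp [h2, List.flatMap_append]

theorem pvInv_foldl (parts : List String) (st : List String × PySem.Set (String × String))
    (d : PySem.Dict String String) (h : pvInv st d) :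
    pvInv (parts.foldl pvStepA st) (parts.foldl pvStepB d) := by
  induction parts generalizing st d with
  | nil => exact h
  | cons p ps ih => exact ih _ _ (pvInv_step st d p h)

-- ===== VERDICT (by name: the statement is the Claim_ definition above) =====
theorem cookie_header_to_netscape_py_spec : Claim_equal_cookie_header_to_netscape_py := by
  intro text _
  unfold Spec_cookie_header_to_netscape_py cookie_header_to_netscape_py cookie_header_to_netscape_py_alt
  by_cases ht : text = ""
  · simp [ht]
  · simp only [ht]
    have hinv := pvInv_foldl (pvSplitSemi text)
      (["# Netscape HTTP Cookie File"], PySem.Set.empty)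
      (PySem.Dict.empty : PySem.Dict String String) ⟨rfl, rfl⟩
    set st := (pvSplitSemi text).foldl pvStepA (["# Netscape HTTP Cookie File"], PySem.Set.empty) with hst
    set d := (pvSplitSemi text).foldl pvStepB (PySem.Dict.empty : PySem.Dict String String) with hd
    obtain ⟨h1, _⟩ := hinv
    have hlen : st.1.length = 1 + (d.items.flatMap pvEmit).length := by
      rw [h1]; simp [Nat.add_comm]
    by_cases hi : d.items = []
    · simp [hi, h1]
    · have hfm : (d.items.flatMap pvEmit).length ≠ 0 := by
        obtain ⟨p, ps, hcons⟩ := List.exists_cons_of_ne_nil hi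
        rw [hcons]; simp [pvEmit]
      have : st.1.length ≠ 1 := by omega
      simp only [hi, this, if_false]
      rw [h1, PySem.List.foldl_append_eq_flatMap, List.singleton_append]
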